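-- pv_equiv track=rewrite | github.com/Flip451/SoTOHE-core | scripts/check_layers.py | reachable_paths
-- ===== SOURCE A (Python) =====
-- from collections import deque
--
-- def reachable_paths(graph: dict[str, set[str]], start: str) -> dict[str, list[str]]:
--     found: dict[str, list[str]] = {}
--     queue: deque[list[str]] = deque([[start]])
--     while queue:
--         path = queue.popleft()
--         current = path[-1]
--         for dependency in sorted(graph.get(current, set())):
--             if dependency == start or dependency in found:
--                 continue
--             next_path = path + [dependency]
--             found[dependency] = next_path
--             queue.append(next_path)
--     return found
-- ===== SOURCE B (Python) =====
-- from collections import deque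
--
--
-- def reachable_paths(graph: dict[str, set[str]], start: str) -> dict[str, list[str]]:
--     # BFS over node names with parent pointers, then one forward pass
--     # rebuilding each path from its parent's path in discovery order.
--     parent: dict[str, str] = {}
--     order: list[str] = []
--     queue: deque[str] = deque([start])
--     while queue:
--         current = queue.popleft()
--         for dependency in sorted(graph.get(current, set())):
--             if dependency == start or dependency in parent:
--                 continue
--             parent[dependency] = current
--             order.append(dependency)
--             queue.append(dependency)
--     paths: dict[str, list[str]] = {start: [start]}
--     result: dict[str, list[str]] = {}
--     for node in order:
--         path = paths[parent[node]] + [node]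
--         paths[node] = path
--         result[node] = path
--     return result
-- ===== Notes on version B (the rewrite author's own statement) =====
-- stated objective: alternative
-- what changed: B runs BFS over plain node names keeping only a parent pointer per node plus a discovery-order list, then rebuilds every path in a separate forward pass from the parent's already-built path, instead of A's queue of full path lists copied at every enqueue.
import Mathlib
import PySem

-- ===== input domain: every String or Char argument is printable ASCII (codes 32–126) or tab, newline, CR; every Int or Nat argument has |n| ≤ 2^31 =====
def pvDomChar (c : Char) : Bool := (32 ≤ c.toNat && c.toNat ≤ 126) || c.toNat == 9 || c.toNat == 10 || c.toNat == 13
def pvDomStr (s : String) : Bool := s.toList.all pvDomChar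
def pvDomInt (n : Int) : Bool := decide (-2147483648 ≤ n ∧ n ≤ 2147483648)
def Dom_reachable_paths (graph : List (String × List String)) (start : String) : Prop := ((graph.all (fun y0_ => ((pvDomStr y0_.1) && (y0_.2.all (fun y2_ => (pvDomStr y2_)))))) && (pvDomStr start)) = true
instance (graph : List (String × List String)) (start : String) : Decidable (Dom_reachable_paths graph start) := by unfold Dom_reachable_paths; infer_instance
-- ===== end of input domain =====

-- B replaces A's queue of full path lists by a BFS over node names with parent
-- pointers and a discovery-order list, rebuilding the paths in a second pass
-- (objective: alternative algorithm/data structure, same cost).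

-- ===== PORT A =====
-- fuel: each loop iteration pops one queue entry; entries are one initial one plus
-- one per fresh key inserted into `found`, so pops ≤ 1 + total adjacency length.
def pvFuel (graph : List (String × List String)) : Nat :=
  (graph.map (fun p => p.2.length)).sum + 1

-- the BFS loop of A: queue of paths, `found` maps node ↦ path
def aLoop (graph : List (String × List String)) (start : String) :
    Nat → PySem.Dict String (List String) → List (List String) →
      PySem.Dict String (List String)
  | _, found, [] => found
  | 0, found, _ => found
  | f + 1, found, path :: rest =>
    -- current = path[-1]; path is never empty, so the `.getD ""` default never fires
    let current := (PySem.List.pyGet? path (-1)).getD ""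
    let deps := PySem.List.sorted ((PySem.Dict.mk graph).getD current []) (fun x => x) false
    let st := deps.foldl
      (fun (st : PySem.Dict String (List String) × List (List String)) dep =>
        if dep == start || st.1.contains dep then st
        else (st.1.insert dep (path ++ [dep]), st.2 ++ [path ++ [dep]]))
      (found, rest)
    aLoop graph start f st.1 st.2

def reachable_paths (graph : List (String × List String)) (start : String) :
    List (String × List String) :=
  (aLoop graph start (pvFuel graph) PySem.Dict.empty [[start]]).items

-- ===== PORT B =====
-- the BFS loop of B: queue of node names, `parent` back-pointers, discovery order
def bLoop (graph : List (String × List String)) (start : String) :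
    Nat → PySem.Dict String String → List String → List String →
      PySem.Dict String String × List String
  | _, parent, order, [] => (parent, order)
  | 0, parent, order, _ => (parent, order)
  | f + 1, parent, order, current :: rest =>
    let deps := PySem.List.sorted ((PySem.Dict.mk graph).getD current []) (fun x => x) false
    let st := deps.foldl
      (fun (st : PySem.Dict String String × List String × List String) dep =>
        if dep == start || st.1.contains dep then st
        else (st.1.insert dep current, st.2.1 ++ [dep], st.2.2 ++ [dep]))
      (parent, order, rest)
    bLoop graph start f st.1 st.2.1 st.2.2

-- reconstruction step: path = paths[parent[node]] + [node]; the `.getD` defaults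
-- never fire (every node in `order` has a parent whose path was already built)
def bReconStep (parent : PySem.Dict String String)
    (st : PySem.Dict String (List String) × PySem.Dict String (List String))
    (node : String) :
    PySem.Dict String (List String) × PySem.Dict String (List String) :=
  let path := st.1.getD (parent.getD node "") [] ++ [node]
  (st.1.insert node path, st.2.insert node path)

def reachable_paths_alt (graph : List (String × List String)) (start : String) :
    List (String × List String) :=
  let r := bLoop graph start (pvFuel graph) PySem.Dict.empty [] [start]
  (r.2.foldl (bReconStep r.1)
    (PySem.Dict.empty.insert start [start], PySem.Dict.empty)).2.items

-- ===== PRECONDITION & SPEC =====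
def Spec_reachable_paths (graph : List (String × List String)) (start : String) (out : List (String × List String)) : Prop := out = reachable_paths_alt graph start
instance (graph : List (String × List String)) (start : String) (out : List (String × List String)) : Decidable (Spec_reachable_paths graph start out) := by unfold Spec_reachable_paths; infer_instance

-- ===== CLAIM (what is proved, stated in full; the proofs are below) =====
def Claim_equal_reachable_paths : Prop := ∀ (graph : List (String × List String)) (start : String), Dom_reachable_paths graph start → Spec_reachable_paths graph start (reachable_paths graph start)

-- ===== LEMMAS AND PROOFS =====

-- the path B's reconstruction assigns to a node, expressed from A's `found`
def pOf (found : PySem.Dict String (List String)) (start n : String) : List String :=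
  if n = start then [start] else found.getD n []

-- B's reconstruction fold as a function of the final parent map and order list
def recon (start : String) (parent : PySem.Dict String String) (order : List String) :
    PySem.Dict String (List String) × PySem.Dict String (List String) :=
  order.foldl (bReconStep parent) (PySem.Dict.empty.insert start [start], PySem.Dict.empty)

-- the lockstep invariant tying A's BFS state to B's BFS state
def pvInv (start : String) (found : PySem.Dict String (List String))
    (qA : List (List String)) (parent : PySem.Dict String String)
    (order : List String) (qB : List String) : Prop :=
  found.keys = order ∧
  parent.keys = order ∧
  start ∉ order ∧
  qA = qB.map (pOf found start) ∧
  (∀ n ∈ qB, n = start ∨ n ∈ order) ∧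
  (∀ n p, found.get? n = some p → ∃ q, p = q ++ [n]) ∧
  recon start parent order = (PySem.Dict.mk ((start, [start]) :: found.items), found)

theorem pyGet_last (xs : List String) (x : String) :
    PySem.List.pyGet? (xs ++ [x]) (-1) = some x := by
  simp [PySem.List.pyGet?, PySem.List.pyIdx?]

theorem recon_congr (start : String) (parent parent' : PySem.Dict String String)
    (order : List String)
    (h : ∀ n ∈ order, parent.get? n = parent'.get? n) :
    recon start parent order = recon start parent' order := by
  unfold recon
  apply PySem.List.foldl_congr_mem
  intro acc x hx
  simp [bReconStep, PySem.Dict.getD_eq_get?_getD, h x hx]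

theorem inner_step (start current : String) (path : List String) (deps : List String) :
    ∀ found qA parent order qB,
    pvInv start found qA parent order qB →
    (current = start ∨ current ∈ order) →
    path = pOf found start current →
    pvInv start
      (deps.foldl (fun (st : PySem.Dict String (List String) × List (List String)) dep =>
        if dep == start || st.1.contains dep then st
        else (st.1.insert dep (path ++ [dep]), st.2 ++ [path ++ [dep]])) (found, qA)).1
      (deps.foldl (fun (st : PySem.Dict String (List String) × List (List String)) dep =>
        if dep == start || st.1.contains dep then st
        else (st.1.insert dep (path ++ [dep]), st.2 ++ [path ++ [dep]])) (found, qA)).2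
      (deps.foldl (fun (st : PySem.Dict String String × List String × List String) dep =>
        if dep == start || st.1.contains dep then st
        else (st.1.insert dep current, st.2.1 ++ [dep], st.2.2 ++ [dep])) (parent, order, qB)).1
      (deps.foldl (fun (st : PySem.Dict String String × List String × List String) dep =>
        if dep == start || st.1.contains dep then st
        else (st.1.insert dep current, st.2.1 ++ [dep], st.2.2 ++ [dep])) (parent, order, qB)).2.1
      (deps.foldl (fun (st : PySem.Dict String String × List String × List String) dep =>
        if dep == start || st.1.contains dep then st
        else (st.1.insert dep current, st.2.1 ++ [dep], st.2.2 ++ [dep])) (parent, order, qB)).2.2 := by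
  induction deps with
  | nil => intro found qA parent order qB hInv _ _; exact hInv
  | cons dep rest ih =>
    intro found qA parent order qB hInv hcur hpath
    obtain ⟨hkf, hkp, hns, hq, hmem, hlast, hrec⟩ := hInv
    have hguard : (dep == start || parent.contains dep) = (dep == start || found.contains dep) := by
      rw [PySem.Dict.contains_eq_decide_mem_keys, PySem.Dict.contains_eq_decide_mem_keys, hkf, hkp]
    simp only [List.foldl_cons, hguard]
    cases hc : (dep == start || found.contains dep) with
    | true =>
      simp only [if_pos]
      exact ih found qA parent order qB ⟨hkf, hkp, hns, hq, hmem, hlast, hrec⟩ hcur hpath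
    | false =>
      simp only [Bool.false_eq_true, if_false]
      rw [Bool.or_eq_false_iff] at hc
      obtain ⟨hc1, hc2⟩ := hc
      have hds : dep ≠ start := by simpa using hc1
      have hdo : dep ∉ order := by
        rw [← hkf, ← PySem.Dict.contains_iff_mem_keys]
        simp [hc2]
      have hcontp : parent.contains dep = false := by
        rw [PySem.Dict.contains_eq_decide_mem_keys, hkp]; simp [hdo]
      have hdc : dep ≠ current := by
        rcases hcur with h | h
        · rw [h]; exact hds
        · intro he; exact hdo (he ▸ h)
      have hgf : found.get? dep = none := by
        rw [PySem.Dict.get?_eq_none_iff_contains]; exact hc2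
      have hcs : current ≠ start → current ∈ order := by
        intro h; rcases hcur with h' | h'
        · exact absurd h' h
        · exact h'
      have hitems : (found.insert dep (path ++ [dep])).items
          = found.items ++ [(dep, path ++ [dep])] :=
        PySem.Dict.items_insert_of_not_contains _ _ hc2
      refine ih (found.insert dep (path ++ [dep])) (qA ++ [path ++ [dep]])
        (parent.insert dep current) (order ++ [dep]) (qB ++ [dep]) ⟨?_, ?_, ?_, ?_, ?_, ?_, ?_⟩
        ?_ ?_
      · rw [PySem.Dict.keys_insert_of_not_contains _ _ hc2, hkf]
      · rw [PySem.Dict.keys_insert_of_not_contains _ _ hcontp, hkp]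
      · simp [hns, Ne.symm hds]
      · rw [List.map_append]
        have h1 : qB.map (pOf (found.insert dep (path ++ [dep])) start) = qA := by
          rw [hq]
          apply List.map_congr_left
          intro n hn
          rcases hmem n hn with h | h
          · simp [pOf, h]
          · have hnd : n ≠ dep := fun he => hdo (he ▸ h)
            simp [pOf, PySem.Dict.getD_insert_of_ne _ _ _ hnd]
        rw [h1]
        have h2 : pOf (found.insert dep (path ++ [dep])) start dep = path ++ [dep] := by
          simp [pOf, hds, PySem.Dict.getD_insert_self]
        simp [h2]
      · intro n hn
        rcases List.mem_append.1 hn with h | h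
        · rcases hmem n h with h' | h'
          · exact Or.inl h'
          · exact Or.inr (List.mem_append.2 (Or.inl h'))
        · simp at h; subst h; exact Or.inr (by simp)
      · intro n p hp
        by_cases hnd : n = dep
        · subst hnd
          rw [PySem.Dict.get?_insert_self] at hp
          exact ⟨path, by simpa using hp.symm⟩
        · rw [PySem.Dict.get?_insert_of_ne _ _ hnd] at hp
          exact hlast n p hp
      · -- recon equation for the extended state
        have hpar : recon start (parent.insert dep current) order = recon start parent order := by
          apply (recon_congr _ _ _ _ _).symm
          intro n hn
          have hne : n ≠ dep := by intro he; exact hdo (he ▸ hn)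
          exact (PySem.Dict.get?_insert_of_ne _ _ hne).symm
        have hgetmk : ∀ x : String, (PySem.Dict.mk ((start, [start]) :: found.items)).get? x
            = if start == x then some [start] else found.get? x := by
          intro x
          rw [PySem.Dict.get?_mk_cons]
        have hpathcur : (PySem.Dict.mk ((start, [start]) :: found.items)).getD current [] = path := by
          rw [PySem.Dict.getD_eq_get?_getD, hgetmk]
          by_cases h : current = start
          · subst h; simp [hpath, pOf]
          · have : (start == current) = false := by simp [Ne.symm h]
            rw [this]
            simp [hpath, pOf, h, PySem.Dict.getD_eq_get?_getD]
        have hncmk : (PySem.Dict.mk ((start, [start]) :: found.items)).contains dep = false := by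
          rw [PySem.Dict.contains_eq_isSome_get?, hgetmk]
          have : (start == dep) = false := by simp [Ne.symm hds]
          rw [this]
          simp [hgf]
        show recon start (parent.insert dep current) (order ++ [dep]) = _
        rw [recon, List.foldl_append]
        have : List.foldl (bReconStep (parent.insert dep current))
            (PySem.Dict.empty.insert start [start], PySem.Dict.empty) order
            = (PySem.Dict.mk ((start, [start]) :: found.items), found) := by
          rw [← recon, hpar, hrec]
        rw [this]
        simp only [List.foldl_cons, List.foldl_nil, bReconStep]
        rw [PySem.Dict.getD_insert_self, hpathcur]
        refine Prod.ext ?_ rfl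
        apply PySem.Dict.ext
        rw [PySem.Dict.items_insert_of_not_contains _ _ hncmk]
        simp [hitems]
      · rcases hcur with h | h
        · exact Or.inl h
        · exact Or.inr (List.mem_append.2 (Or.inl h))
      · by_cases h : current = start
        · subst h; simpa [pOf] using hpath
        · have hco := hcs h
          have : current ≠ dep := Ne.symm hdc
          simp only [pOf, if_neg h] at hpath ⊢
          rw [PySem.Dict.getD_insert_of_ne _ _ _ this]
          exact hpath

theorem outer_loop (graph : List (String × List String)) (start : String) :
    ∀ fuel found qA parent order qB,
    pvInv start found qA parent order qB →
    aLoop graph start fuel found qA =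
      (recon start (bLoop graph start fuel parent order qB).1
        (bLoop graph start fuel parent order qB).2).2 := by
  intro fuel
  induction fuel with
  | zero =>
    intro found qA parent order qB hInv
    obtain ⟨_, _, _, hq, _, _, hrec⟩ := hInv
    cases qB with
    | nil =>
      rw [hq]
      simp only [List.map_nil, aLoop, bLoop, hrec]
    | cons c t =>
      rw [hq]
      simp only [List.map_cons, aLoop, bLoop, hrec]
  | succ f ihf =>
    intro found qA parent order qB hInv
    obtain ⟨hkf, hkp, hns, hq, hmem, hlast, hrec⟩ := hInv
    cases qB with
    | nil =>
      rw [hq]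
      simp only [List.map_nil, aLoop, bLoop, hrec]
    | cons current restB =>
      rw [hq]
      have hcur : current = start ∨ current ∈ order := hmem current (by simp)
      have hcurid : ((PySem.List.pyGet? (pOf found start current) (-1)).getD "") = current := by
        rcases hcur with h | h
        · rw [h]
          have : pOf found start start = [] ++ [start] := by simp [pOf]
          rw [this, pyGet_last]; rfl
        · have hne : current ≠ start := fun he => hns (he ▸ h)
          have hcont : found.contains current = true := by
            rw [PySem.Dict.contains_iff_mem_keys, hkf]; exact h
          rw [PySem.Dict.contains_eq_isSome_get?] at hcont
          obtain ⟨p, hp⟩ := Option.isSome_iff_exists.mp hcont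
          obtain ⟨q, hq'⟩ := hlast current p hp
          have : pOf found start current = q ++ [current] := by
            simp [pOf, hne, PySem.Dict.getD_eq_get?_getD, hp, hq']
          rw [this, pyGet_last]; rfl
      simp only [List.map_cons, aLoop, bLoop, hcurid]
      exact ihf _ _ _ _ _
        (inner_step start current (pOf found start current) _ found (restB.map (pOf found start))
          parent order restB ⟨hkf, hkp, hns, rfl, fun n hn => hmem n (by simp [hn]), hlast, hrec⟩
          hcur rfl)

theorem pvInv_init (start : String) :
    pvInv start PySem.Dict.empty [[start]] PySem.Dict.empty [] [start] := by
  refine ⟨rfl, rfl, by simp, by simp [pOf], by simp, ?_, rfl⟩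
  intro n p hp
  rw [PySem.Dict.get?_empty] at hp
  exact absurd hp (by simp)

-- ===== VERDICT (by name: the statement is the Claim_ definition above) =====
theorem reachable_paths_spec : Claim_equal_reachable_paths := by
  intro graph start _
  unfold Spec_reachable_paths reachable_paths reachable_paths_alt
  rw [outer_loop graph start (pvFuel graph) PySem.Dict.empty [[start]]
    PySem.Dict.empty [] [start] (pvInv_init start)]
  rfl
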